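-- pv_equiv track=rewrite | github.com/tomislavrupic/HAOS-IIP | numerics/simulations/stage_c0_5_emergent_compression_preorder.py | apply_pass_separation
-- ===== SOURCE A (Python) =====
-- from collections import defaultdict, deque
--
-- def canonical_partition(classes: list[list[int]] | list[tuple[int, ...]]) -> tuple[tuple[int, ...], ...]:
--     cleaned = [tuple(sorted(int(value) for value in cls)) for cls in classes if cls]
--     return tuple(sorted(cleaned, key=lambda cls: (cls[0], len(cls))))
--
-- def partition_map(partition: tuple[tuple[int, ...], ...]) -> dict[int, tuple[int, ...]]:
--     mapping: dict[int, tuple[int, ...]] = {}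
--     for cls in partition:
--         for node in cls:
--             mapping[int(node)] = cls
--     return mapping
--
-- def apply_pass_separation(
--     raw_partition: tuple[tuple[int, ...], ...],
--     inherited_partition: tuple[tuple[int, ...], ...],
-- ) -> tuple[tuple[tuple[int, ...], ...], int]:
--     if not inherited_partition:
--         return raw_partition, 0
--     inherited_map = partition_map(inherited_partition)
--     merged_classes = 0
--     next_classes: list[list[int]] = []
--     for raw_cls in raw_partition:
--         by_inherited: dict[tuple[int, ...], list[int]] = defaultdict(list)
--         for node in raw_cls:
--             key = inherited_map.get(int(node), (int(node),))
--             by_inherited[key].append(int(node))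
--         if len(by_inherited) > 1:
--             merged_classes += 1
--         next_classes.extend(list(by_inherited.values()))
--     return canonical_partition(next_classes), merged_classes
-- ===== SOURCE B (Python) =====
-- def apply_pass_separation(raw_partition, inherited_partition):
--     if not inherited_partition:
--         return raw_partition, 0
--     owner = {int(v): tuple(cls) for cls in inherited_partition for v in cls}
--     merged_classes = 0
--     next_classes = []
--     for raw_cls in raw_partition:
--         ks = [owner.get(int(n), (int(n),)) for n in raw_cls]
--         uniq = list(dict.fromkeys(ks))
--         if len(uniq) > 1:
--             merged_classes += 1
--         next_classes.extend([int(n) for n, kk in zip(raw_cls, ks) if kk == k] for k in uniq)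
--     cleaned = sorted((tuple(sorted(g)) for g in next_classes if g),
--                      key=lambda g: (g[0], len(g)))
--     return tuple(cleaned), merged_classes
-- ===== Notes on version B (the rewrite author's own statement) =====
-- stated objective: simpler
-- what changed: B drops A's defaultdict bucketing loop: it builds the node-to-class map as a dict comprehension, computes each raw class's key list up front, deduplicates it in order with dict.fromkeys, and forms each group by a zip-filter comprehension per distinct key instead of appending to mutable buckets.
import Mathlib
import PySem

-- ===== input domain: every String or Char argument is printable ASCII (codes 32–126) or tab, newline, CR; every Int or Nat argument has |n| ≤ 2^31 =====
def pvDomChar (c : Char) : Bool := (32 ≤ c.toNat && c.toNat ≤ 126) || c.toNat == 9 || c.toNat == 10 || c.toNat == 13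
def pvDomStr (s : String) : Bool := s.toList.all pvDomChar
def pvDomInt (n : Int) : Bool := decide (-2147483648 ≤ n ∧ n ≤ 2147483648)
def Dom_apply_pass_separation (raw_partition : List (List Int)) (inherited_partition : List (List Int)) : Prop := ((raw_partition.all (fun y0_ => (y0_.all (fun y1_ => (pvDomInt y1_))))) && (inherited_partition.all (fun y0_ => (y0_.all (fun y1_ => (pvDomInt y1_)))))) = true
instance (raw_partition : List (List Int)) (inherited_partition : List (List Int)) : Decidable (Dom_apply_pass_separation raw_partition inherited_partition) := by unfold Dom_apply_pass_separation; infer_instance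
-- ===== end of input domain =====

-- B replaces A's per-class defaultdict bucketing by computing all inherited keys of a class up front,
-- deduplicating them in order (dict.fromkeys) and building each group by a zip-filter pass (objective: simpler; not faster).

-- ===== PORT A =====
-- canonical_partition: drop empty classes, sort each, stable-sort by the key (cls[0], len(cls)).
-- cls[0] is ported as headD 0: after the 'if cls' filter every class is nonempty, so Python never raises here.
def pvCanonicalPartition (classes : List (List Int)) : List (List Int) :=
  let cleaned := (classes.filter (fun cls => !cls.isEmpty)).map
    (fun cls => PySem.List.sorted cls (fun v => v) false)
  PySem.List.sorted2 cleaned (fun cls => cls.headD 0) (fun cls => (cls.length : Int)) false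

-- partition_map: mapping[int(node)] = cls, later writes overwrite
def pvPartitionMap (partition : List (List Int)) : PySem.Dict Int (List Int) :=
  partition.foldl
    (fun mapping cls => cls.foldl (fun mapping node => mapping.insert node cls) mapping)
    PySem.Dict.empty

def apply_pass_separation (raw_partition : List (List Int)) (inherited_partition : List (List Int)) : List (List Int) × Int :=
  if inherited_partition.isEmpty then (raw_partition, 0)
  else
    let inherited_map := pvPartitionMap inherited_partition
    -- loop state: (merged_classes, next_classes)
    let st := raw_partition.foldl
      (fun (st : Int × List (List Int)) (raw_cls : List Int) =>
        -- by_inherited: defaultdict(list); by_inherited[key].append(node)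
        let by_inherited := raw_cls.foldl
          (fun d node => d.modify ((inherited_map.get? node).getD [node]) [] (fun cur => cur ++ [node]))
          PySem.Dict.empty
        (if 1 < by_inherited.size then st.1 + 1 else st.1, st.2 ++ by_inherited.values))
      (0, [])
    (pvCanonicalPartition st.2, st.1)

-- ===== PORT B =====
-- owner = {int(v): tuple(cls) for cls in inherited_partition for v in cls}  (later classes overwrite)
def pvOwner (inherited_partition : List (List Int)) : PySem.Dict Int (List Int) :=
  inherited_partition.foldl
    (fun owner cls => cls.foldl (fun owner v => owner.insert v cls) owner)
    PySem.Dict.empty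

-- cleaned = sorted((tuple(sorted(g)) for g in next_classes if g), key=lambda g: (g[0], len(g)))
def pvCleanedSorted (groups : List (List Int)) : List (List Int) :=
  PySem.List.sorted2
    ((groups.filter (fun g => !g.isEmpty)).map (fun g => PySem.List.sorted g (fun v => v) false))
    (fun g => g.headD 0) (fun g => (g.length : Int)) false

def apply_pass_separation_alt (raw_partition : List (List Int)) (inherited_partition : List (List Int)) : List (List Int) × Int :=
  if inherited_partition.isEmpty then (raw_partition, 0)
  else
    let owner := pvOwner inherited_partition
    -- loop state: (merged_classes, next_classes)
    let st := raw_partition.foldl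
      (fun (st : Int × List (List Int)) (raw_cls : List Int) =>
        let ks := raw_cls.map (fun n => (owner.get? n).getD [n])
        -- uniq = list(dict.fromkeys(ks))
        let uniq := PySem.List.dedup ks
        (if 1 < uniq.length then st.1 + 1 else st.1,
         st.2 ++ uniq.map (fun k => ((raw_cls.zip ks).filter (fun p => p.2 == k)).map (fun p => p.1))))
      (0, [])
    (pvCleanedSorted st.2, st.1)

-- ===== PRECONDITION & SPEC =====
def Spec_apply_pass_separation (raw_partition : List (List Int)) (inherited_partition : List (List Int)) (out : List (List Int) × Int) : Prop := out = apply_pass_separation_alt raw_partition inherited_partition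
instance (raw_partition : List (List Int)) (inherited_partition : List (List Int)) (out : List (List Int) × Int) : Decidable (Spec_apply_pass_separation raw_partition inherited_partition out) := by unfold Spec_apply_pass_separation; infer_instance

-- ===== CLAIM (what is proved, stated in full; the proofs are below) =====
def Claim_equal_apply_pass_separation : Prop := ∀ (raw_partition : List (List Int)) (inherited_partition : List (List Int)), Dom_apply_pass_separation raw_partition inherited_partition → Spec_apply_pass_separation raw_partition inherited_partition (apply_pass_separation raw_partition inherited_partition)

-- ===== LEMMAS AND PROOFS =====

-- B's dict comprehension builds exactly A's partition_map (same nested insertion loop)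
theorem pv_owner_eq (inh : List (List Int)) : pvOwner inh = pvPartitionMap inh := rfl

-- the zip-filter pass of B extracts exactly the nodes whose key is k
theorem pv_zip_filter (cls : List Int) (key : Int → List Int) (k : List Int) :
    ((cls.zip (cls.map key)).filter (fun p => p.2 == k)).map (fun p => p.1)
      = cls.filter (fun n => key n == k) := by
  induction cls with
  | nil => rfl
  | cons n t ih =>
      simp only [List.map_cons, List.zip_cons_cons, List.filter_cons]
      by_cases hk : key n == k <;> simp [hk, ih]

-- A's per-class defaultdict grouping, characterised: keys are the ordered dedup of the node keys
theorem pv_group_keys (key : Int → List Int) (cls : List Int) :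
    (cls.foldl (fun d n => d.modify (key n) [] (fun cur => cur ++ [n])) PySem.Dict.empty).keys
      = PySem.List.dedup (cls.map key) := by
  have h := PySem.Dict.keys_foldl_modify_key cls key [] (fun _ n cur => cur ++ [n]) PySem.Dict.empty
  simpa [PySem.Dict.keys_empty, PySem.List.dedup, PySem.Set.ofList] using h

theorem pv_group_getD (key : Int → List Int) (cls : List Int) (c : List Int) :
    (cls.foldl (fun d n => d.modify (key n) [] (fun cur => cur ++ [n])) PySem.Dict.empty).getD c []
      = cls.filter (fun n => key n == c) := by
  have hmap : cls.foldl (fun d n => d.modify (key n) [] (fun cur => cur ++ [n])) PySem.Dict.empty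
      = (cls.map (fun n => (key n, n))).foldl (fun d p => d.modify p.1 [] (fun cur => cur ++ [p.2])) PySem.Dict.empty := by
    rw [List.foldl_map]
  rw [hmap, PySem.Dict.getD_foldl_modify_append]
  simp [List.filter_map, Function.comp_def]

-- and its values are, in key order, the filtered node runs
theorem pv_group_values (key : Int → List Int) (cls : List Int) :
    (cls.foldl (fun d n => d.modify (key n) [] (fun cur => cur ++ [n])) PySem.Dict.empty).values
      = (PySem.List.dedup (cls.map key)).map (fun k => cls.filter (fun n => key n == k)) := by
  have hnd : (cls.foldl (fun d n => d.modify (key n) [] (fun cur => cur ++ [n])) PySem.Dict.empty).keys.Nodup := by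
    exact PySem.Dict.nodup_keys_foldl_modify_key cls key [] (fun _ n cur => cur ++ [n]) PySem.Dict.empty
      (by simp [PySem.Dict.keys_empty])
  rw [PySem.Dict.values_eq_map_keys _ hnd [], pv_group_keys]
  exact List.map_congr_left (fun k _ => pv_group_getD key cls k)

theorem pv_group_size (key : Int → List Int) (cls : List Int) :
    (cls.foldl (fun d n => d.modify (key n) [] (fun cur => cur ++ [n])) PySem.Dict.empty).size
      = (PySem.List.dedup (cls.map key)).length := by
  have h := congrArg List.length (pv_group_keys key cls)
  simpa [PySem.Dict.keys, PySem.Dict.size] using h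

-- ===== VERDICT (by name: the statement is the Claim_ definition above) =====
theorem apply_pass_separation_spec : Claim_equal_apply_pass_separation := by
  unfold Claim_equal_apply_pass_separation
  intro raw inh _
  unfold Spec_apply_pass_separation apply_pass_separation apply_pass_separation_alt
  by_cases h : inh.isEmpty
  · simp [h]
  · simp only [h, pv_owner_eq]
    have hstep : (fun (st : Int × List (List Int)) (raw_cls : List Int) =>
        let by_inherited := raw_cls.foldl
          (fun d node => d.modify (((pvPartitionMap inh).get? node).getD [node]) [] (fun cur => cur ++ [node]))
          PySem.Dict.empty
        (if 1 < by_inherited.size then st.1 + 1 else st.1, st.2 ++ by_inherited.values))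
        = (fun (st : Int × List (List Int)) (raw_cls : List Int) =>
        let ks := raw_cls.map (fun n => ((pvPartitionMap inh).get? n).getD [n])
        let uniq := PySem.List.dedup ks
        (if 1 < uniq.length then st.1 + 1 else st.1,
         st.2 ++ uniq.map (fun k => ((raw_cls.zip ks).filter (fun p => p.2 == k)).map (fun p => p.1)))) := by
      funext st raw_cls
      simp only [pv_group_size (fun n => ((pvPartitionMap inh).get? n).getD [n]) raw_cls,
        pv_group_values (fun n => ((pvPartitionMap inh).get? n).getD [n]) raw_cls,
        pv_zip_filter raw_cls (fun n => ((pvPartitionMap inh).get? n).getD [n])]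
    simp only [hstep]
    rfl
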